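-- pv_equiv track=rewrite | github.com/swaroop-smilecode/graph | Problems/p10_semesters_required/p10_semesters_required.py | _explore_dfs
-- ===== SOURCE A (Python) =====
-- def  _explore_dfs(graph, course, visited):
--     # Base case
--     if graph[course] == []:
--         return 1
--     if course in visited:
--         return visited[course]
--
--     # Recursive calls
--     neighbor_courses = set()
--     for neighbor in graph[course]:
--         neighbor_courses.add( _explore_dfs(graph, neighbor, visited))
--     max_neighbor_courses = max(neighbor_courses)
--     visited[course] = 1 + max_neighbor_courses
--
--     return visited[course]
-- ===== SOURCE B (Python) =====
-- def _explore_dfs(graph, course, visited):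
--     memo = dict(visited)
--     # gather every course reachable from `course` that is not yet memoized
--     reach = []
--     frontier = [course]
--     while frontier:
--         nxt = []
--         for n in frontier:
--             if n not in memo and n not in reach:
--                 reach.append(n)
--                 nxt.extend(graph[n])
--         frontier = nxt
--     # resolve in rounds: a course is ready once all of its prerequisites are known
--     while any(n not in memo for n in reach):
--         for n in reach:
--             if n not in memo and all(m in memo for m in graph[n]):
--                 memo[n] = 1 if not graph[n] else 1 + max(memo[m] for m in graph[n])
--     return memo[course]
-- ===== Notes on version B (the rewrite author's own statement) =====
-- stated objective: alternative
-- what changed: Replaces A's memoized recursive DFS (which mutates `visited`) by an iterative two-phase algorithm: a frontier loop collects every not-yet-memoized course reachable from `course`, then rounds resolve each course once all its prerequisites are known; B treats `visited` purely as a memo cache and does not mutate it. Pre_ excludes inputs where A raises (missing graph key: KeyError; …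
-- outside the precondition, e.g. on _explore_dfs({1: [2], 2: []}, 1, {2: 5}): A returns 2, B returns 6; on _explore_dfs({1: []}, 1, {1: 7}): A returns 1, B returns 7
import Mathlib
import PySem

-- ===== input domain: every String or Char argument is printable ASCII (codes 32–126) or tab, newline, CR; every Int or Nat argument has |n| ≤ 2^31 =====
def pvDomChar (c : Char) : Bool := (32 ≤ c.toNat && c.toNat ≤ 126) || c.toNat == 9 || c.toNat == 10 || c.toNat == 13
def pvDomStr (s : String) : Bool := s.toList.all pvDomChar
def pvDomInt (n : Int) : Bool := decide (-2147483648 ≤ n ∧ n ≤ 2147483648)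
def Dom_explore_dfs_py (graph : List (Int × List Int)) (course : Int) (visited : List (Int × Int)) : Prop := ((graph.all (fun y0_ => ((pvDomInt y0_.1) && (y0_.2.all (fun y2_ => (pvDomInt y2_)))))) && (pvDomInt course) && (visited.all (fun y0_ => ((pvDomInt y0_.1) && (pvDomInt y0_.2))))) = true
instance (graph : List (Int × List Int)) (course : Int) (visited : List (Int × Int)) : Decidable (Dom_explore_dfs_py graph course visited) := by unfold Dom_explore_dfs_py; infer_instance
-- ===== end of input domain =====

-- B replaces A's memoized recursive DFS by an iterative two-phase algorithm (collect the unmemoized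
-- reachable courses, then resolve them in rounds); unlike A, B does not mutate `visited`, so the
-- equivalence proved here is about the RETURN value only.

-- ===== PORT A =====
def pvKeysL (g : List (Int × List Int)) : List Int := g.map Prod.fst

theorem pv_mem_keys_of_get? (g : List (Int × List Int)) (c : Int) (adj : List Int)
    (h : (PySem.Dict.mk g).get? c = some adj) : c ∈ (pvKeysL g).toFinset := by
  by_contra hmem
  have h0 : (PySem.Dict.mk g).get? c = none := by
    rw [PySem.Dict.get?_eq_none_iff_not_mem_keys]
    simpa [pvKeysL, PySem.Dict.keys_mk] using hmem
  rw [h0] at h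
  simp at h

theorem pv_card_lt (g : List (Int × List Int)) (path : Finset Int) (c : Int)
    (hk : c ∈ (pvKeysL g).toFinset) (hc : c ∉ path) :
    ((pvKeysL g).toFinset \ insert c path).card < ((pvKeysL g).toFinset \ path).card := by
  apply Finset.card_lt_card
  constructor
  · intro x hx
    simp only [Finset.mem_sdiff, Finset.mem_insert] at hx ⊢
    exact ⟨hx.1, fun h => hx.2 (Or.inr h)⟩
  · intro hsub
    have := hsub (Finset.mem_sdiff.mpr ⟨hk, hc⟩)
    simp at this

mutual
def dfsA (g : List (Int × List Int)) (path : Finset Int) (c : Int) (vis : PySem.Dict Int Int) :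
    Int × PySem.Dict Int Int :=
  match h : (PySem.Dict.mk g).get? c with
  | none => (0, vis)          -- Python raises KeyError here (excluded by Pre_)
  | some adj =>
    if adj = [] then (1, vis)
    else
      match vis.get? c with
      | some v => (v, vis)
      | none =>
        if hc : c ∈ path then (0, vis)   -- totalization guard (Python's recursion is unbounded); never reached under Pre_
        else
          let p := dfsAList g (insert c path) adj PySem.Set.empty vis
          let m := (PySem.List.max? p.1 (fun x => x)).getD 0
          let vis2 := p.2.insert c (1 + m)
          (vis2.getD c 0, vis2)
termination_by (((pvKeysL g).toFinset \ path).card, 0)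
decreasing_by
  exact Prod.Lex.left _ _ (pv_card_lt g path c (pv_mem_keys_of_get? g c adj h) hc)

def dfsAList (g : List (Int × List Int)) (path : Finset Int) (adj : List Int)
    (s : PySem.Set Int) (vis : PySem.Dict Int Int) : PySem.Set Int × PySem.Dict Int Int :=
  match adj with
  | [] => (s, vis)
  | a :: rest =>
    let r := dfsA g path a vis
    dfsAList g path rest (PySem.Set.add s r.1) r.2
termination_by (((pvKeysL g).toFinset \ path).card, adj.length + 1)
decreasing_by
  · exact Prod.Lex.right _ (by simp only [List.length_cons]; omega)
  · exact Prod.Lex.right _ (by simp only [List.length_cons]; omega)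
end

def explore_dfs_py (graph : List (Int × List Int)) (course : Int) (visited : List (Int × Int)) : Int :=
  (dfsA graph ∅ course (PySem.Dict.mk visited)).1

-- ===== PORT B =====
def pvAdj (g : List (Int × List Int)) (n : Int) : List Int := (PySem.Dict.mk g).getD n []
  -- graph[n]; a missing key is Python's KeyError, excluded by Pre_

def pvReachStep (g : List (Int × List Int)) (memo : PySem.Dict Int Int)
    (st : List Int × List Int) (n : Int) : List Int × List Int :=
  if !memo.contains n && !st.1.contains n then (st.1 ++ [n], st.2 ++ pvAdj g n) else st

def pvReachLoop (g : List (Int × List Int)) (memo : PySem.Dict Int Int) :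
    Nat → List Int × List Int → List Int
  | 0, st => st.1
  | fuel+1, st =>
    if st.2 = [] then st.1
    else pvReachLoop g memo fuel (st.2.foldl (pvReachStep g memo) (st.1, []))

-- fuel bounding Source B's `while frontier` loop: `reach` holds distinct courses drawn from the start
-- course and the adjacency lists and grows in every round but the last, so this many rounds suffice
def pvFuel (g : List (Int × List Int)) : Nat := 3 + (g.map (fun p => p.2.length)).sum

def pvReach (g : List (Int × List Int)) (memo : PySem.Dict Int Int) (init : List Int) : List Int :=
  pvReachLoop g memo (pvFuel g) ([], init)

def pvResStep (g : List (Int × List Int)) (memo : PySem.Dict Int Int) (n : Int) :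
    PySem.Dict Int Int :=
  if !memo.contains n && (pvAdj g n).all memo.contains then
    memo.insert n (if (pvAdj g n).isEmpty then 1
      else 1 + ((PySem.List.max? ((pvAdj g n).map (fun m => memo.getD m 0)) (fun x => x)).getD 0))
  else memo

def pvResLoop (g : List (Int × List Int)) (reach : List Int) :
    Nat → PySem.Dict Int Int → PySem.Dict Int Int
  | 0, memo => memo
  | fuel+1, memo =>
    if reach.all memo.contains then memo
    else pvResLoop g reach fuel (reach.foldl (pvResStep g) memo)

def explore_dfs_py_alt (graph : List (Int × List Int)) (course : Int) (visited : List (Int × Int)) : Int :=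
  let memo := PySem.Dict.mk visited
  let reach := pvReach graph memo [course]
  -- fuel bounding Source B's `while any(...)` loop: every round resolves a course (under Pre_)
  (pvResLoop graph reach (reach.length + 1) memo).getD course 0
  -- memo[course]; KeyError (unresolvable course) is excluded by Pre_

-- ===== PRECONDITION & SPEC =====
-- the set of courses the evaluation touches: the least set containing `init` and closed under
-- taking prerequisites of its unmemoized members (an iterated closure operator on finite sets,
-- reaching its fixpoint after at most |init| + Σ|adjacency| + 1 steps)
def pvRStep (g : List (Int × List Int)) (vd : PySem.Dict Int Int) (S : Finset Int) : Finset Int :=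
  S ∪ (S.filter (fun n => vd.contains n = false)).biUnion (fun n => (pvAdj g n).toFinset)

def pvRSet (g : List (Int × List Int)) (vd : PySem.Dict Int Int) (init : List Int) : Finset Int :=
  (pvRStep g vd)^[(init ++ g.flatMap (fun p => p.2)).length + 1] init.toFinset

-- Pre_ excludes exactly: inputs where A raises (a touched course missing from `graph`: KeyError; a
-- cyclic dependency among unmemoized courses: RecursionError) and the defensible corner where a
-- touched course with an empty prerequisite list is pre-seeded in `visited` with a value other
-- than 1 (A's base-case-before-memo ordering returns 1 there, B honours the memo entry).
def Pre_explore_dfs_py (graph : List (Int × List Int)) (course : Int) (visited : List (Int × Int)) : Prop :=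
  (∀ n ∈ pvRSet graph (PySem.Dict.mk visited) [course], n ∈ pvKeysL graph) ∧
  (∀ n ∈ pvRSet graph (PySem.Dict.mk visited) [course],
      (PySem.Dict.mk visited).contains n = false →
      n ∉ pvRSet graph (PySem.Dict.mk visited) (pvAdj graph n)) ∧
  (∀ n ∈ pvRSet graph (PySem.Dict.mk visited) [course], pvAdj graph n = [] →
      (PySem.Dict.mk visited).get? n = none ∨ (PySem.Dict.mk visited).get? n = some 1)
instance (graph : List (Int × List Int)) (course : Int) (visited : List (Int × Int)) : Decidable (Pre_explore_dfs_py graph course visited) := by unfold Pre_explore_dfs_py; infer_instance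

def pvWitness_explore_dfs_py : (List (Int × List Int)) × Int × (List (Int × Int)) :=
  ([(1, [2, 3]), (2, [3]), (3, [])], 1, [(2, 5)])

def Spec_explore_dfs_py (graph : List (Int × List Int)) (course : Int) (visited : List (Int × Int)) (out : Int) : Prop := out = explore_dfs_py_alt graph course visited
instance (graph : List (Int × List Int)) (course : Int) (visited : List (Int × Int)) (out : Int) : Decidable (Spec_explore_dfs_py graph course visited out) := by unfold Spec_explore_dfs_py; infer_instance

-- ===== CLAIM (what is proved, stated in full; the proofs are below) =====
def Claim_equal_explore_dfs_py : Prop := ∀ (graph : List (Int × List Int)) (course : Int) (visited : List (Int × Int)), Dom_explore_dfs_py graph course visited → Pre_explore_dfs_py graph course visited → Spec_explore_dfs_py graph course visited (explore_dfs_py graph course visited)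

-- ===== LEMMAS AND PROOFS =====

def pvTouch (g : List (Int × List Int)) (visited : List (Int × Int)) (course : Int) : List Int :=
  course :: (pvReach g (PySem.Dict.mk visited) [course]).flatMap (pvAdj g)

theorem pv_witness_ok :
    Dom_explore_dfs_py (pvWitness_explore_dfs_py.1) (pvWitness_explore_dfs_py.2.1) (pvWitness_explore_dfs_py.2.2) ∧
    Pre_explore_dfs_py (pvWitness_explore_dfs_py.1) (pvWitness_explore_dfs_py.2.1) (pvWitness_explore_dfs_py.2.2) := by
  decide

-- ---------- reach phase: properties of the frontier loop ----------

theorem pv_mem_adj_flat (g : List (Int × List Int)) (n m : Int) (h : m ∈ pvAdj g n) :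
    m ∈ g.flatMap (fun p => p.2) := by
  induction g with
  | nil =>
    unfold pvAdj at h
    rw [show PySem.Dict.mk ([] : List (Int × List Int)) = PySem.Dict.empty from rfl,
      PySem.Dict.getD_eq_get?_getD, PySem.Dict.get?_empty] at h
    simp at h
  | cons p t ih =>
    rw [List.flatMap_cons, List.mem_append]
    unfold pvAdj at h ih
    rw [PySem.Dict.getD_eq_get?_getD] at h
    rcases p with ⟨k, l⟩
    rw [PySem.Dict.get?_mk_cons] at h
    by_cases hk : k == n
    · rw [if_pos hk] at h
      exact Or.inl (by simpa using h)
    · rw [if_neg hk] at h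
      rw [← PySem.Dict.getD_eq_get?_getD] at h
      exact Or.inr (ih h)

theorem pv_reachfold_shape (g : List (Int × List Int)) (memo : PySem.Dict Int Int)
    (frontier : List Int) :
    ∀ st, ∃ tr tn, frontier.foldl (pvReachStep g memo) st = (st.1 ++ tr, st.2 ++ tn) ∧
      (tr = [] → tn = []) := by
  induction frontier with
  | nil => intro st; exact ⟨[], [], by simp, fun _ => rfl⟩
  | cons a rest ih =>
    intro st
    rw [List.foldl_cons]
    obtain ⟨tr, tn, heq, himp⟩ := ih (pvReachStep g memo st a)
    unfold pvReachStep at heq ⊢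
    by_cases hc : (!memo.contains a && !st.1.contains a) = true
    · rw [if_pos hc] at heq ⊢
      exact ⟨[a] ++ tr, pvAdj g a ++ tn, by simpa [List.append_assoc] using heq, by simp⟩
    · rw [if_neg hc] at heq ⊢
      exact ⟨tr, tn, heq, himp⟩

theorem pv_reachfold_mono (g : List (Int × List Int)) (memo : PySem.Dict Int Int)
    (frontier : List Int) (st : List Int × List Int) (x : Int) (hx : x ∈ st.1) :
    x ∈ (frontier.foldl (pvReachStep g memo) st).1 := by
  obtain ⟨tr, tn, heq, _⟩ := pv_reachfold_shape g memo frontier st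
  rw [heq]
  exact List.mem_append_left _ hx

theorem pv_reachfold_mono2 (g : List (Int × List Int)) (memo : PySem.Dict Int Int)
    (frontier : List Int) (st : List Int × List Int) (x : Int) (hx : x ∈ st.2) :
    x ∈ (frontier.foldl (pvReachStep g memo) st).2 := by
  obtain ⟨tr, tn, heq, _⟩ := pv_reachfold_shape g memo frontier st
  rw [heq]
  exact List.mem_append_left _ hx

theorem pv_reachfold_adds_fresh (g : List (Int × List Int)) (memo : PySem.Dict Int Int)
    (frontier : List Int) :
    ∀ st x, x ∈ frontier → memo.contains x = false →
      x ∈ (frontier.foldl (pvReachStep g memo) st).1 := by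
  induction frontier with
  | nil => intro st x hx; simp at hx
  | cons a rest ih =>
    intro st x hx hf
    rw [List.foldl_cons]
    rcases List.mem_cons.mp hx with rfl | hx
    · have hstep : x ∈ (pvReachStep g memo st x).1 := by
        unfold pvReachStep
        by_cases hm : x ∈ st.1
        · split <;> simp [hm]
        · rw [if_pos (by simp [hf, List.contains_eq_mem, hm])]
          simp
      exact pv_reachfold_mono g memo rest _ x hstep
    · exact ih _ x hx hf

theorem pv_reachfold_src (g : List (Int × List Int)) (memo : PySem.Dict Int Int)
    (frontier : List Int) :
    ∀ st x, x ∈ (frontier.foldl (pvReachStep g memo) st).1 → x ∈ st.1 ∨ x ∈ frontier := by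
  induction frontier with
  | nil => intro st x hx; exact Or.inl hx
  | cons a rest ih =>
    intro st x hx
    rcases ih _ x hx with hx1 | hx1
    · unfold pvReachStep at hx1
      by_cases hc : (!memo.contains a && !st.1.contains a) = true
      · rw [if_pos hc] at hx1
        rcases List.mem_append.mp hx1 with h | h
        · exact Or.inl h
        · exact Or.inr (by simp at h; simp [h])
      · rw [if_neg hc] at hx1
        exact Or.inl hx1
    · exact Or.inr (List.mem_cons_of_mem a hx1)

theorem pv_reachfold_nxt_src (g : List (Int × List Int)) (memo : PySem.Dict Int Int)
    (frontier : List Int) :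
    ∀ st x, x ∈ (frontier.foldl (pvReachStep g memo) st).2 →
      x ∈ st.2 ∨ ∃ n ∈ (frontier.foldl (pvReachStep g memo) st).1, x ∈ pvAdj g n := by
  induction frontier with
  | nil => intro st x hx; exact Or.inl hx
  | cons a rest ih =>
    intro st x hx
    rw [List.foldl_cons] at hx ⊢
    rcases ih _ x hx with hx1 | hx1
    · unfold pvReachStep at hx1
      by_cases hc : (!memo.contains a && !st.1.contains a) = true
      · rw [if_pos hc] at hx1
        rcases List.mem_append.mp hx1 with h | h
        · exact Or.inl h
        · refine Or.inr ⟨a, ?_, h⟩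
          apply pv_reachfold_mono
          unfold pvReachStep
          rw [if_pos hc]
          simp
      · rw [if_neg hc] at hx1
        exact Or.inl hx1
    · exact Or.inr hx1

theorem pv_reachfold_fresh (g : List (Int × List Int)) (memo : PySem.Dict Int Int)
    (frontier : List Int) :
    ∀ st, (∀ n ∈ st.1, memo.contains n = false) →
      ∀ n ∈ (frontier.foldl (pvReachStep g memo) st).1, memo.contains n = false := by
  induction frontier with
  | nil => intro st h; exact h
  | cons a rest ih =>
    intro st h
    rw [List.foldl_cons]
    apply ih
    unfold pvReachStep
    by_cases hc : (!memo.contains a && !st.1.contains a) = true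
    · rw [if_pos hc]
      intro n hn
      rcases List.mem_append.mp hn with h1 | h1
      · exact h n h1
      · simp only [List.mem_singleton] at h1
        subst h1
        simp only [Bool.and_eq_true, Bool.not_eq_true'] at hc
        exact hc.1
    · rw [if_neg hc]; exact h

theorem pv_reachfold_nodup (g : List (Int × List Int)) (memo : PySem.Dict Int Int)
    (frontier : List Int) :
    ∀ st, st.1.Nodup → (frontier.foldl (pvReachStep g memo) st).1.Nodup := by
  induction frontier with
  | nil => intro st h; exact h
  | cons a rest ih =>
    intro st h
    rw [List.foldl_cons]
    apply ih
    unfold pvReachStep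
    by_cases hc : (!memo.contains a && !st.1.contains a) = true
    · rw [if_pos hc]
      simp only [Bool.and_eq_true, Bool.not_eq_true'] at hc
      simp [List.nodup_append, h]
      intro a1 ha1 heq
      subst heq
      have := hc.2
      rw [List.contains_eq_mem] at this
      simp [ha1] at this
    · rw [if_neg hc]; exact h

theorem pv_reachfold_added_children (g : List (Int × List Int)) (memo : PySem.Dict Int Int)
    (frontier : List Int) :
    ∀ st n, n ∈ (frontier.foldl (pvReachStep g memo) st).1 → n ∉ st.1 →
      ∀ m ∈ pvAdj g n, m ∈ (frontier.foldl (pvReachStep g memo) st).2 := by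
  induction frontier with
  | nil => intro st n hn hn0; exact absurd hn hn0
  | cons a rest ih =>
    intro st n hn hn0 m hm
    rw [List.foldl_cons] at hn ⊢
    by_cases hn1 : n ∈ (pvReachStep g memo st a).1
    · unfold pvReachStep at hn1 ⊢
      by_cases hc : (!memo.contains a && !st.1.contains a) = true
      · rw [if_pos hc] at hn1 ⊢
        rcases List.mem_append.mp hn1 with h | h
        · exact absurd h hn0
        · simp only [List.mem_singleton] at h
          subst h
          apply pv_reachfold_mono2
          simp [hm]
      · rw [if_neg hc] at hn1
        exact absurd hn1 hn0
    · exact ih _ n hn hn1 m hm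

theorem pv_reachloop_empty (g : List (Int × List Int)) (memo : PySem.Dict Int Int)
    (fuel : Nat) (st : List Int × List Int) (h : st.2 = []) :
    pvReachLoop g memo fuel st = st.1 := by
  cases fuel with
  | zero => rfl
  | succ fuel => rw [pvReachLoop, if_pos h]

theorem pv_reachloop_mono (g : List (Int × List Int)) (memo : PySem.Dict Int Int) :
    ∀ (fuel : Nat) (st : List Int × List Int) (x : Int), x ∈ st.1 →
      x ∈ pvReachLoop g memo fuel st := by
  intro fuel
  induction fuel with
  | zero => intro st x hx; exact hx
  | succ fuel ih =>
    intro st x hx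
    rw [pvReachLoop]
    by_cases h2 : st.2 = []
    · rw [if_pos h2]; exact hx
    · rw [if_neg h2]
      exact ih _ x (pv_reachfold_mono g memo st.2 (st.1, []) x hx)

theorem pv_reachloop_fresh (g : List (Int × List Int)) (memo : PySem.Dict Int Int) :
    ∀ (fuel : Nat) (st : List Int × List Int), (∀ n ∈ st.1, memo.contains n = false) →
      ∀ n ∈ pvReachLoop g memo fuel st, memo.contains n = false := by
  intro fuel
  induction fuel with
  | zero => intro st h; exact h
  | succ fuel ih =>
    intro st h
    rw [pvReachLoop]
    by_cases h2 : st.2 = []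
    · rw [if_pos h2]; exact h
    · rw [if_neg h2]
      exact ih _ (pv_reachfold_fresh g memo st.2 (st.1, []) h)

theorem pv_reachloop_min (g : List (Int × List Int)) (memo : PySem.Dict Int Int)
    (T : Int → Prop)
    (hT : ∀ n, T n → ∀ m ∈ pvAdj g n, memo.contains m = false → T m) :
    ∀ (fuel : Nat) (st : List Int × List Int),
      (∀ x ∈ st.1, memo.contains x = false) →
      (∀ x ∈ st.1, T x) → (∀ x ∈ st.2, memo.contains x = false → T x) →
      ∀ x ∈ pvReachLoop g memo fuel st, T x := by
  intro fuel
  induction fuel with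
  | zero => intro st _ h1 _; exact h1
  | succ fuel ih =>
    intro st h0 h1 h2
    rw [pvReachLoop]
    by_cases he : st.2 = []
    · rw [if_pos he]; exact h1
    · rw [if_neg he]
      have hfr : ∀ x ∈ (st.2.foldl (pvReachStep g memo) (st.1, [])).1, memo.contains x = false :=
        pv_reachfold_fresh g memo st.2 (st.1, []) h0
      have hr1 : ∀ x ∈ (st.2.foldl (pvReachStep g memo) (st.1, [])).1, T x := by
        intro x hx
        rcases pv_reachfold_src g memo st.2 (st.1, []) x hx with h | h
        · exact h1 x h
        · exact h2 x h (hfr x hx)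
      refine ih _ hfr hr1 ?_
      intro x hx hxf
      rcases pv_reachfold_nxt_src g memo st.2 (st.1, []) x hx with h | ⟨n, hn, hadj⟩
      · simp at h
      · exact hT n (hr1 n hn) x hadj hxf

theorem pv_reachloop_init_mem (g : List (Int × List Int)) (memo : PySem.Dict Int Int)
    (fuel : Nat) (st : List Int × List Int) (x : Int) (hx : x ∈ st.2)
    (hf : memo.contains x = false) (hfuel : 1 ≤ fuel) :
    x ∈ pvReachLoop g memo fuel st := by
  cases fuel with
  | zero => omega
  | succ fuel =>
    rw [pvReachLoop, if_neg (List.ne_nil_of_mem hx)]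
    exact pv_reachloop_mono g memo fuel _ x
      (pv_reachfold_adds_fresh g memo st.2 (st.1, []) x hx hf)

theorem pv_nodup_length_le {l C : List Int} (hnd : l.Nodup) (hsub : ∀ x ∈ l, x ∈ C) :
    l.length ≤ C.toFinset.card := by
  calc l.length = l.toFinset.card := (List.toFinset_card_of_nodup hnd).symm
    _ ≤ C.toFinset.card := Finset.card_le_card (fun x hx => by
        rw [List.mem_toFinset] at hx ⊢
        exact hsub x hx)

theorem pv_reachloop_closed_aux (g : List (Int × List Int)) (memo : PySem.Dict Int Int)
    (C : List Int) (hCE : ∀ x ∈ g.flatMap (fun p => p.2), x ∈ C) :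
    ∀ (fuel : Nat) (st : List Int × List Int),
      st.1.Nodup →
      (∀ x ∈ st.1, x ∈ C) → (∀ x ∈ st.2, x ∈ C) →
      (∀ n ∈ st.1, ∀ m ∈ pvAdj g n, memo.contains m = false → m ∈ st.1 ∨ m ∈ st.2) →
      C.toFinset.card + 2 ≤ fuel + st.1.length →
      ∀ n ∈ pvReachLoop g memo fuel st, ∀ m ∈ pvAdj g n, memo.contains m = false →
        m ∈ pvReachLoop g memo fuel st := by
  intro fuel
  induction fuel with
  | zero =>
    intro st hnd hs1 _ _ hcard
    have := pv_nodup_length_le hnd hs1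
    omega
  | succ fuel ih =>
    intro st hnd hs1 hs2 hpend hcard
    rw [pvReachLoop]
    by_cases he : st.2 = []
    · rw [if_pos he]
      intro n hn m hm hmf
      rcases hpend n hn m hm hmf with h | h
      · exact h
      · rw [he] at h; simp at h
    · rw [if_neg he]
      set st' := st.2.foldl (pvReachStep g memo) (st.1, []) with hst'
      obtain ⟨tr, tn, heq, himp⟩ := pv_reachfold_shape g memo st.2 (st.1, [])
      have hnd' : st'.1.Nodup := pv_reachfold_nodup g memo st.2 (st.1, []) hnd
      have hs1' : ∀ x ∈ st'.1, x ∈ C := by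
        intro x hx
        rcases pv_reachfold_src g memo st.2 (st.1, []) x hx with h | h
        · exact hs1 x h
        · exact hs2 x h
      have hs2' : ∀ x ∈ st'.2, x ∈ C := by
        intro x hx
        rcases pv_reachfold_nxt_src g memo st.2 (st.1, []) x hx with h | ⟨n, _, hadj⟩
        · simp at h
        · exact hCE x (pv_mem_adj_flat g n x hadj)
      have hpend' : ∀ n ∈ st'.1, ∀ m ∈ pvAdj g n, memo.contains m = false →
          m ∈ st'.1 ∨ m ∈ st'.2 := by
        intro n hn m hm hmf
        by_cases hn0 : n ∈ st.1
        · rcases hpend n hn0 m hm hmf with h | h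
          · exact Or.inl (pv_reachfold_mono g memo st.2 (st.1, []) m h)
          · exact Or.inl (pv_reachfold_adds_fresh g memo st.2 (st.1, []) m h hmf)
        · exact Or.inr (pv_reachfold_added_children g memo st.2 (st.1, []) n hn hn0 m hm)
      by_cases htr : tr = []
      · have htn : tn = [] := himp htr
        have hst1 : st'.1 = st.1 := by rw [hst', heq, htr]; simp
        have hst2 : st'.2 = [] := by rw [hst', heq, htn]; simp
        rw [pv_reachloop_empty g memo fuel st' hst2]
        intro n hn m hm hmf
        rcases hpend' n hn m hm hmf with h | h
        · exact h
        · rw [hst2] at h; simp at h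
      · have hlen : st.1.length + 1 ≤ st'.1.length := by
          rw [hst', heq]
          simp only [List.length_append]
          have := List.length_pos_of_ne_nil htr
          omega
        exact ih st' hnd' hs1' hs2' hpend' (by omega)

-- instantiated properties of pvReach

theorem pv_reach_fresh (g : List (Int × List Int)) (memo : PySem.Dict Int Int) (init : List Int) :
    ∀ n ∈ pvReach g memo init, memo.contains n = false :=
  pv_reachloop_fresh g memo (pvFuel g) ([], init) (by simp)

theorem pv_reach_init_mem (g : List (Int × List Int)) (memo : PySem.Dict Int Int) (init : List Int)
    (x : Int) (hx : x ∈ init) (hf : memo.contains x = false) : x ∈ pvReach g memo init :=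
  pv_reachloop_init_mem g memo (pvFuel g) ([], init) x hx hf (by unfold pvFuel; omega)

theorem pv_reach_min (g : List (Int × List Int)) (memo : PySem.Dict Int Int) (init : List Int)
    (T : Int → Prop)
    (hT : ∀ n, T n → ∀ m ∈ pvAdj g n, memo.contains m = false → T m)
    (hinit : ∀ x ∈ init, memo.contains x = false → T x) :
    ∀ x ∈ pvReach g memo init, T x :=
  pv_reachloop_min g memo T hT (pvFuel g) ([], init) (by simp) (by simp) hinit

theorem pv_E_card (g : List (Int × List Int)) :
    (g.flatMap (fun p => p.2)).length = (g.map (fun p => p.2.length)).sum := by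
  rw [List.length_flatMap]

theorem pv_reach_closed_of_card (g : List (Int × List Int)) (memo : PySem.Dict Int Int)
    (init : List Int) (hcard : (init ++ g.flatMap (fun p => p.2)).toFinset.card + 2 ≤ pvFuel g) :
    ∀ n ∈ pvReach g memo init, ∀ m ∈ pvAdj g n, memo.contains m = false →
      m ∈ pvReach g memo init := by
  apply pv_reachloop_closed_aux g memo (init ++ g.flatMap (fun p => p.2))
    (fun x hx => List.mem_append_right _ hx) (pvFuel g) ([], init)
    (by simp) (by simp) (fun x hx => List.mem_append_left _ hx) (by simp)
  simpa using hcard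

theorem pv_reach_closed_single (g : List (Int × List Int)) (memo : PySem.Dict Int Int) (c : Int) :
    ∀ n ∈ pvReach g memo [c], ∀ m ∈ pvAdj g n, memo.contains m = false →
      m ∈ pvReach g memo [c] := by
  apply pv_reach_closed_of_card
  have h1 : ([c] ++ g.flatMap (fun p => p.2)).toFinset.card
      ≤ ([c] ++ g.flatMap (fun p => p.2)).length := List.toFinset_card_le _
  have h2 : ([c] ++ g.flatMap (fun p => p.2)).length = 1 + (g.map (fun p => p.2.length)).sum := by
    simp
    omega
  unfold pvFuel
  omega

theorem pv_reach_closed_adj (g : List (Int × List Int)) (memo : PySem.Dict Int Int) (p : Int) :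
    ∀ n ∈ pvReach g memo (pvAdj g p), ∀ m ∈ pvAdj g n, memo.contains m = false →
      m ∈ pvReach g memo (pvAdj g p) := by
  apply pv_reach_closed_of_card
  have hsub : ∀ x ∈ pvAdj g p ++ g.flatMap (fun q => q.2), x ∈ g.flatMap (fun q => q.2) := by
    intro x hx
    rcases List.mem_append.mp hx with h | h
    · exact pv_mem_adj_flat g p x h
    · exact h
  have h1 : (pvAdj g p ++ g.flatMap (fun q => q.2)).toFinset.card
      ≤ (g.flatMap (fun q => q.2)).toFinset.card := by
    apply Finset.card_le_card
    intro x hx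
    rw [List.mem_toFinset] at hx ⊢
    exact hsub x hx
  have h2 : (g.flatMap (fun q => q.2)).toFinset.card ≤ (g.flatMap (fun q => q.2)).length :=
    List.toFinset_card_le _
  have h3 := pv_E_card g
  unfold pvFuel
  omega

-- ---------- measure from acyclicity ----------

def pvMeas (g : List (Int × List Int)) (vd : PySem.Dict Int Int) (n : Int) : Nat :=
  if vd.contains n = false then ((pvReach g vd (pvAdj g n)).toFinset ∪ {n}).card else 0

theorem pv_meas_lt (g : List (Int × List Int)) (vd : PySem.Dict Int Int) (n m : Int)
    (hfn : vd.contains n = false) (hacycn : n ∉ pvReach g vd (pvAdj g n))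
    (hm : m ∈ pvAdj g n) : pvMeas g vd m < pvMeas g vd n := by
  have hnotin : n ∉ (pvReach g vd (pvAdj g n)).toFinset := by
    rw [List.mem_toFinset]; exact hacycn
  have hmeasn : pvMeas g vd n = (pvReach g vd (pvAdj g n)).toFinset.card + 1 := by
    unfold pvMeas
    rw [if_pos hfn, Finset.union_comm, Finset.singleton_union,
      Finset.card_insert_of_notMem hnotin]
  by_cases hfm : vd.contains m = false
  · have hmem : m ∈ pvReach g vd (pvAdj g n) := pv_reach_init_mem g vd _ m hm hfm
    have hsub : insert m (pvReach g vd (pvAdj g m)).toFinset ⊆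
        (pvReach g vd (pvAdj g n)).toFinset := by
      intro x hx
      rw [List.mem_toFinset]
      rcases Finset.mem_insert.mp hx with rfl | hx
      · exact hmem
      · rw [List.mem_toFinset] at hx
        refine pv_reach_min g vd (pvAdj g m) (fun y => y ∈ pvReach g vd (pvAdj g n)) ?_ ?_ x hx
        · exact fun y hy z hz hzf => pv_reach_closed_adj g vd n y hy z hz hzf
        · exact fun y hy hyf => pv_reach_closed_adj g vd n m hmem y hy hyf
    have hms : pvMeas g vd m = ((pvReach g vd (pvAdj g m)).toFinset ∪ {m}).card := by
      unfold pvMeas; rw [if_pos hfm]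
    rw [hms, hmeasn, Finset.union_comm, Finset.singleton_union]
    have := Finset.card_le_card hsub
    omega
  · have : pvMeas g vd m = 0 := by unfold pvMeas; rw [if_neg hfm]
    rw [this, hmeasn]
    omega

-- ---------- resolve phase ----------

def pvDMono (v1 v2 : PySem.Dict Int Int) : Prop := ∀ k w, v1.get? k = some w → v2.get? k = some w

theorem pvDMono_refl (v : PySem.Dict Int Int) : pvDMono v v := fun _ _ h => h

theorem pvDMono_trans {v1 v2 v3 : PySem.Dict Int Int} (h1 : pvDMono v1 v2) (h2 : pvDMono v2 v3) :
    pvDMono v1 v3 := fun k w h => h2 k w (h1 k w h)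

theorem pv_contains_mono {v1 v2 : PySem.Dict Int Int} (h : pvDMono v1 v2) (k : Int)
    (hk : v1.contains k = true) : v2.contains k = true := by
  rw [PySem.Dict.contains_eq_isSome_get?] at hk ⊢
  obtain ⟨w, hw⟩ := Option.isSome_iff_exists.mp hk
  rw [h k w hw]
  rfl

theorem pv_not_contains_get? (v : PySem.Dict Int Int) (k : Int) (h : v.contains k = false) :
    v.get? k = none := by
  rw [PySem.Dict.contains_eq_isSome_get?] at h
  cases hv : v.get? k with
  | none => rfl
  | some w => rw [hv] at h; simp at h

def pvEqV (g : List (Int × List Int)) (memo : PySem.Dict Int Int) (n : Int) : Int :=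
  if (pvAdj g n).isEmpty then 1
  else 1 + ((PySem.List.max? ((pvAdj g n).map (fun m => memo.getD m 0)) (fun x => x)).getD 0)

theorem pv_resstep_eq (g : List (Int × List Int)) (memo : PySem.Dict Int Int) (n : Int)
    (h : (!memo.contains n && (pvAdj g n).all memo.contains) = true) :
    pvResStep g memo n = memo.insert n (pvEqV g memo n) := by
  unfold pvResStep pvEqV
  rw [if_pos h]

theorem pv_resstep_mono (g : List (Int × List Int)) (memo : PySem.Dict Int Int) (n : Int) :
    pvDMono memo (pvResStep g memo n) := by
  unfold pvResStep
  by_cases hc : (!memo.contains n && (pvAdj g n).all memo.contains) = true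
  · rw [if_pos hc]
    intro k w h
    have hne : k ≠ n := by
      rintro rfl
      simp only [Bool.and_eq_true, Bool.not_eq_true'] at hc
      rw [pv_not_contains_get? memo k hc.1] at h
      simp at h
    rw [PySem.Dict.get?_insert, if_neg hne]
    exact h
  · rw [if_neg hc]; exact pvDMono_refl memo

theorem pv_resfold_mono (g : List (Int × List Int)) (l : List Int) :
    ∀ memo, pvDMono memo (l.foldl (pvResStep g) memo) := by
  induction l with
  | nil => intro memo; exact pvDMono_refl memo
  | cons a t ih =>
    intro memo
    rw [List.foldl_cons]
    exact pvDMono_trans (pv_resstep_mono g memo a) (ih _)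

theorem pv_eqv_stable (g : List (Int × List Int)) {v1 v2 : PySem.Dict Int Int}
    (h : pvDMono v1 v2) (n : Int) (hall : (pvAdj g n).all v1.contains = true) :
    pvEqV g v2 n = pvEqV g v1 n := by
  unfold pvEqV
  by_cases hl : (pvAdj g n).isEmpty
  · rw [if_pos hl, if_pos hl]
  · rw [if_neg hl, if_neg hl]
    have hmap : (pvAdj g n).map (fun m => v2.getD m 0) = (pvAdj g n).map (fun m => v1.getD m 0) := by
      apply List.map_congr_left
      intro m hm
      rw [List.all_eq_true] at hall
      have hc := hall m hm
      rw [PySem.Dict.contains_eq_isSome_get?] at hc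
      obtain ⟨w, hw⟩ := Option.isSome_iff_exists.mp hc
      rw [PySem.Dict.getD_of_get?_eq_some v1 0 hw, PySem.Dict.getD_of_get?_eq_some v2 0 (h m w hw)]
    rw [hmap]

theorem pv_all_contains_mono (g : List (Int × List Int)) {v1 v2 : PySem.Dict Int Int}
    (h : pvDMono v1 v2) (n : Int) (hall : (pvAdj g n).all v1.contains = true) :
    (pvAdj g n).all v2.contains = true := by
  rw [List.all_eq_true] at hall ⊢
  exact fun m hm => pv_contains_mono h m (hall m hm)

def pvEqInv (g : List (Int × List Int)) (vd memo : PySem.Dict Int Int) : Prop :=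
  (∀ k w, vd.get? k = some w → memo.get? k = some w) ∧
  (∀ n w, memo.get? n = some w → vd.get? n = some w ∨
    (vd.get? n = none ∧ (pvAdj g n).all memo.contains = true ∧ w = pvEqV g memo n))

theorem pv_eqinv_init (g : List (Int × List Int)) (vd : PySem.Dict Int Int) :
    pvEqInv g vd vd :=
  ⟨fun _ _ h => h, fun _ w h => Or.inl h⟩

theorem pv_eqinv_step (g : List (Int × List Int)) (vd memo : PySem.Dict Int Int) (n : Int)
    (h : pvEqInv g vd memo) : pvEqInv g vd (pvResStep g memo n) := by
  have hmono := pv_resstep_mono g memo n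
  by_cases hc : (!memo.contains n && (pvAdj g n).all memo.contains) = true
  · rw [pv_resstep_eq g memo n hc] at hmono ⊢
    simp only [Bool.and_eq_true, Bool.not_eq_true'] at hc
    constructor
    · intro k w hk
      exact hmono k w (h.1 k w hk)
    · intro k w hk
      rw [PySem.Dict.get?_insert] at hk
      by_cases hkn : k = n
      · rw [if_pos hkn] at hk
        subst hkn
        right
        refine ⟨?_, pv_all_contains_mono g hmono k hc.2, ?_⟩
        · cases hv : vd.get? k with
          | none => rfl
          | some w' =>
            have := h.1 k w' hv
            rw [pv_not_contains_get? memo k hc.1] at this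
            simp at this
        · rw [pv_eqv_stable g hmono k hc.2]
          exact (Option.some_inj.mp hk).symm
      · rw [if_neg hkn] at hk
        rcases h.2 k w hk with h1 | ⟨h1, h2, h3⟩
        · exact Or.inl h1
        · exact Or.inr ⟨h1, pv_all_contains_mono g hmono k h2,
            by rw [pv_eqv_stable g hmono k h2]; exact h3⟩
  · unfold pvResStep
    rw [if_neg hc]
    exact h

theorem pv_eqinv_fold (g : List (Int × List Int)) (vd : PySem.Dict Int Int) (l : List Int) :
    ∀ memo, pvEqInv g vd memo → pvEqInv g vd (l.foldl (pvResStep g) memo) := by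
  induction l with
  | nil => intro memo h; exact h
  | cons a t ih => intro memo h; exact ih _ (pv_eqinv_step g vd memo a h)

theorem pv_eqinv_loop (g : List (Int × List Int)) (vd : PySem.Dict Int Int) (R : List Int) :
    ∀ (fuel : Nat) (memo : PySem.Dict Int Int), pvEqInv g vd memo →
      pvEqInv g vd (pvResLoop g R fuel memo) := by
  intro fuel
  induction fuel with
  | zero => intro memo h; exact h
  | succ fuel ih =>
    intro memo h
    rw [pvResLoop]
    by_cases hall : R.all memo.contains
    · rw [if_pos hall]; exact h
    · rw [if_neg hall]
      exact ih _ (pv_eqinv_fold g vd R memo h)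

theorem pv_resolvable (g : List (Int × List Int)) (vd : PySem.Dict Int Int) (R : List Int)
    (hcl : ∀ n ∈ R, ∀ m ∈ pvAdj g n, vd.contains m = false → m ∈ R)
    (hacyc : ∀ n ∈ R, n ∉ pvReach g vd (pvAdj g n))
    (hRf : ∀ n ∈ R, vd.contains n = false) :
    ∀ (N : Nat) (memo : PySem.Dict Int Int),
      (∀ k, vd.contains k = true → memo.contains k = true) →
      ∀ n, pvMeas g vd n ≤ N → n ∈ R → memo.contains n = false →
      ∃ n', n' ∈ R ∧ memo.contains n' = false ∧ (pvAdj g n').all memo.contains = true := by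
  intro N
  induction N with
  | zero =>
    intro memo hsup n hN hn hun
    by_cases hall : (pvAdj g n).all memo.contains = true
    · exact ⟨n, hn, hun, hall⟩
    · exfalso
      obtain ⟨m, hm, hmf⟩ := List.all_eq_false.mp (Bool.eq_false_iff.mpr hall)
      have hmv : vd.contains m = false := by
        cases hv : vd.contains m
        · rfl
        · rw [hsup m hv] at hmf; simp at hmf
      have := pv_meas_lt g vd n m (hRf n hn) (hacyc n hn) hm
      omega
  | succ N ih =>
    intro memo hsup n hN hn hun
    by_cases hall : (pvAdj g n).all memo.contains = true
    · exact ⟨n, hn, hun, hall⟩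
    · obtain ⟨m, hm, hmf⟩ := List.all_eq_false.mp (Bool.eq_false_iff.mpr hall)
      have hmv : vd.contains m = false := by
        cases hv : vd.contains m
        · rfl
        · rw [hsup m hv] at hmf; simp at hmf
      have hmlt := pv_meas_lt g vd n m (hRf n hn) (hacyc n hn) hm
      exact ih memo hsup m (by omega) (hcl n hn m hm hmv) (Bool.eq_false_iff.mpr hmf)

theorem pv_resolve_in_round (g : List (Int × List Int)) (l : List Int) :
    ∀ (memo : PySem.Dict Int Int) (n : Int), n ∈ l →
      (pvAdj g n).all memo.contains = true →
      (l.foldl (pvResStep g) memo).contains n = true := by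
  induction l with
  | nil => intro memo n hn; simp at hn
  | cons a t ih =>
    intro memo n hn hall
    rw [List.foldl_cons]
    have hmono1 := pv_resstep_mono g memo a
    rcases List.mem_cons.mp hn with rfl | hn
    · have h1 : (pvResStep g memo n).contains n = true := by
        by_cases hkn : memo.contains n = true
        · exact pv_contains_mono hmono1 n hkn
        · have hkn' : memo.contains n = false := Bool.eq_false_iff.mpr hkn
          rw [pv_resstep_eq g memo n (by simp [hkn', hall])]
          exact PySem.Dict.contains_insert_self _ _ _
      exact pv_contains_mono (pv_resfold_mono g t _) n h1
    · exact ih _ n hn (pv_all_contains_mono g hmono1 n hall)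

theorem pv_countP_strict (l : List Int) (p q : Int → Bool)
    (himp : ∀ x ∈ l, q x = true → p x = true) (x0 : Int) (hx0 : x0 ∈ l)
    (hp : p x0 = true) (hq : q x0 = false) : l.countP q < l.countP p := by
  induction l with
  | nil => simp at hx0
  | cons a t ih =>
    rw [List.countP_cons, List.countP_cons]
    rcases List.mem_cons.mp hx0 with heq | hx0
    · have hle := List.countP_mono_left (p := q) (q := p)
        (fun x hx => himp x (List.mem_cons_of_mem a hx))
      have hqa : q a = false := heq ▸ hq
      have hpa : p a = true := heq ▸ hp
      rw [hqa, hpa]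
      simp
      omega
    · have hstrict := ih (fun x hx => himp x (List.mem_cons_of_mem a hx)) hx0
      by_cases ha : q a = true
      · have hpa := himp a List.mem_cons_self ha
        rw [ha, hpa]
        omega
      · have hqa : q a = false := Bool.eq_false_iff.mpr ha
        rw [hqa]
        by_cases hpa : p a = true <;> simp only [hpa] <;> simp <;> omega

theorem pv_round_strict (g : List (Int × List Int)) (vd : PySem.Dict Int Int) (R : List Int)
    (hcl : ∀ n ∈ R, ∀ m ∈ pvAdj g n, vd.contains m = false → m ∈ R)
    (hacyc : ∀ n ∈ R, n ∉ pvReach g vd (pvAdj g n))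
    (hRf : ∀ n ∈ R, vd.contains n = false)
    (memo : PySem.Dict Int Int)
    (hsup : ∀ k, vd.contains k = true → memo.contains k = true)
    (h : 0 < R.countP (fun n => !memo.contains n)) :
    R.countP (fun n => !(R.foldl (pvResStep g) memo).contains n)
      < R.countP (fun n => !memo.contains n) := by
  obtain ⟨n0, hn0, hn0u⟩ := List.countP_pos_iff.mp h
  simp only [Bool.not_eq_true'] at hn0u
  obtain ⟨n', hn', hn'u, hn'all⟩ :=
    pv_resolvable g vd R hcl hacyc hRf (pvMeas g vd n0) memo hsup n0 le_rfl hn0 hn0u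
  apply pv_countP_strict _ _ _ ?_ n' hn'
  · simp only [Bool.not_eq_true']
    exact hn'u
  · simp only [Bool.not_eq_false']
    exact pv_resolve_in_round g R memo n' hn' hn'all
  · intro x hx hq
    simp only [Bool.not_eq_true'] at hq ⊢
    by_contra hb
    have hxk : memo.contains x = true := by
      cases hxv : memo.contains x
      · exact absurd hxv hb
      · rfl
    rw [pv_contains_mono (pv_resfold_mono g R memo) x hxk] at hq
    simp at hq

theorem pv_resloop_resolves (g : List (Int × List Int)) (vd : PySem.Dict Int Int) (R : List Int)
    (hcl : ∀ n ∈ R, ∀ m ∈ pvAdj g n, vd.contains m = false → m ∈ R)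
    (hacyc : ∀ n ∈ R, n ∉ pvReach g vd (pvAdj g n))
    (hRf : ∀ n ∈ R, vd.contains n = false) :
    ∀ (fuel : Nat) (memo : PySem.Dict Int Int), pvEqInv g vd memo →
      R.countP (fun n => !memo.contains n) ≤ fuel →
      ∀ n ∈ R, (pvResLoop g R fuel memo).contains n = true := by
  intro fuel
  induction fuel with
  | zero =>
    intro memo _ hle n hn
    have hz : R.countP (fun n => !memo.contains n) = 0 := Nat.le_zero.mp hle
    rw [List.countP_eq_zero] at hz
    have := hz n hn
    simp only [Bool.not_eq_true'] at this
    cases hv : memo.contains n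
    · exact absurd hv this
    · exact hv
  | succ fuel ih =>
    intro memo heq hle n hn
    rw [pvResLoop]
    by_cases hall : R.all memo.contains = true
    · rw [if_pos hall]
      rw [List.all_eq_true] at hall
      exact hall n hn
    · rw [if_neg hall]
      have hsup : ∀ k, vd.contains k = true → memo.contains k = true := by
        intro k hk
        rw [PySem.Dict.contains_eq_isSome_get?] at hk
        obtain ⟨w, hw⟩ := Option.isSome_iff_exists.mp hk
        have := heq.1 k w hw
        rw [PySem.Dict.contains_eq_isSome_get?, this]
        rfl
      have hpos : 0 < R.countP (fun n => !memo.contains n) := by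
        obtain ⟨m, hm, hmf⟩ := List.all_eq_false.mp (Bool.eq_false_iff.mpr hall)
        apply List.countP_pos_iff.mpr
        exact ⟨m, hm, by simp [hmf]⟩
      have hstrict := pv_round_strict g vd R hcl hacyc hRf memo hsup hpos
      exact ih _ (pv_eqinv_fold g vd R memo heq) (by omega) n hn

-- ---------- the final memo table and its characterisation ----------

def pvM (g : List (Int × List Int)) (vs : List (Int × Int)) (c0 : Int) : PySem.Dict Int Int :=
  pvResLoop g (pvReach g (PySem.Dict.mk vs) [c0])
    ((pvReach g (PySem.Dict.mk vs) [c0]).length + 1) (PySem.Dict.mk vs)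

theorem pv_alt_eq (g : List (Int × List Int)) (c0 : Int) (vs : List (Int × Int)) :
    explore_dfs_py_alt g c0 vs = (pvM g vs c0).getD c0 0 := rfl

theorem pv_M_eqinv (g : List (Int × List Int)) (vs : List (Int × Int)) (c0 : Int) :
    pvEqInv g (PySem.Dict.mk vs) (pvM g vs c0) :=
  pv_eqinv_loop g _ _ _ _ (pv_eqinv_init g _)

theorem pv_M_sup (g : List (Int × List Int)) (vs : List (Int × Int)) (c0 : Int) (k : Int) (w : Int)
    (h : (PySem.Dict.mk vs).get? k = some w) : (pvM g vs c0).get? k = some w :=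
  (pv_M_eqinv g vs c0).1 k w h

theorem pv_M_all (g : List (Int × List Int)) (vs : List (Int × Int)) (c0 : Int)
    (hacyc : ∀ n ∈ pvReach g (PySem.Dict.mk vs) [c0],
      n ∉ pvReach g (PySem.Dict.mk vs) (pvAdj g n)) :
    ∀ n ∈ pvReach g (PySem.Dict.mk vs) [c0], (pvM g vs c0).contains n = true := by
  apply pv_resloop_resolves g (PySem.Dict.mk vs) _
    (pv_reach_closed_single g _ c0) hacyc (pv_reach_fresh g _ _)
    _ _ (pv_eqinv_init g _)
  exact le_trans List.countP_le_length (Nat.le_succ _)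

theorem pv_touch_mem_R (g : List (Int × List Int)) (vs : List (Int × Int)) (c0 : Int)
    (n : Int) (hn : n ∈ pvTouch g vs c0) (hf : (PySem.Dict.mk vs).contains n = false) :
    n ∈ pvReach g (PySem.Dict.mk vs) [c0] := by
  unfold pvTouch at hn
  rcases List.mem_cons.mp hn with rfl | hn
  · exact pv_reach_init_mem g _ [n] n (by simp) hf
  · obtain ⟨p, hp, hadj⟩ := List.mem_flatMap.mp hn
    exact pv_reach_closed_single g _ c0 p hp n hadj hf

theorem pv_M_leaf (g : List (Int × List Int)) (vs : List (Int × Int)) (c0 : Int)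
    (hleaf : ∀ n ∈ pvTouch g vs c0, pvAdj g n = [] →
      (PySem.Dict.mk vs).get? n = none ∨ (PySem.Dict.mk vs).get? n = some 1)
    (hacyc : ∀ n ∈ pvReach g (PySem.Dict.mk vs) [c0],
      n ∉ pvReach g (PySem.Dict.mk vs) (pvAdj g n))
    (n : Int) (hn : n ∈ pvTouch g vs c0) (hl : pvAdj g n = []) :
    (pvM g vs c0).getD n 0 = 1 := by
  rcases hleaf n hn hl with hv | hv
  · have hf : (PySem.Dict.mk vs).contains n = false := by
      rw [PySem.Dict.contains_eq_isSome_get?, hv]; rfl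
    have hR := pv_touch_mem_R g vs c0 n hn hf
    have hc := pv_M_all g vs c0 hacyc n hR
    rw [PySem.Dict.contains_eq_isSome_get?] at hc
    obtain ⟨w, hw⟩ := Option.isSome_iff_exists.mp hc
    rcases (pv_M_eqinv g vs c0).2 n w hw with h1 | ⟨_, _, h3⟩
    · rw [hv] at h1; simp at h1
    · rw [PySem.Dict.getD_of_get?_eq_some _ 0 hw, h3]
      unfold pvEqV
      rw [if_pos (by rw [hl]; rfl)]
  · rw [PySem.Dict.getD_of_get?_eq_some _ 0 (pv_M_sup g vs c0 n 1 hv)]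

theorem pv_M_node (g : List (Int × List Int)) (vs : List (Int × Int)) (c0 : Int)
    (hacyc : ∀ n ∈ pvReach g (PySem.Dict.mk vs) [c0],
      n ∉ pvReach g (PySem.Dict.mk vs) (pvAdj g n))
    (n : Int) (hn : n ∈ pvReach g (PySem.Dict.mk vs) [c0]) (hl : ¬ (pvAdj g n).isEmpty = true) :
    ∃ w, (pvM g vs c0).get? n = some w ∧
      w = 1 + ((PySem.List.max? ((pvAdj g n).map (fun m => (pvM g vs c0).getD m 0))
        (fun x => x)).getD 0) := by
  have hc := pv_M_all g vs c0 hacyc n hn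
  rw [PySem.Dict.contains_eq_isSome_get?] at hc
  obtain ⟨w, hw⟩ := Option.isSome_iff_exists.mp hc
  refine ⟨w, hw, ?_⟩
  rcases (pv_M_eqinv g vs c0).2 n w hw with h1 | ⟨_, _, h3⟩
  · have hf := pv_reach_fresh g (PySem.Dict.mk vs) [c0] n hn
    rw [PySem.Dict.contains_eq_isSome_get?, h1] at hf
    simp at hf
  · rw [h3]
    unfold pvEqV
    rw [if_neg hl]

theorem pv_max_eq (l1 l2 : List Int) (h1 : l1 ≠ []) (h2 : l2 ≠ []) (hiff : ∀ x, x ∈ l1 ↔ x ∈ l2) :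
    (PySem.List.max? l1 (fun x => x)).getD 0 = (PySem.List.max? l2 (fun x => x)).getD 0 := by
  obtain ⟨m1, hm1⟩ : ∃ m1, PySem.List.max? l1 (fun x => x) = some m1 := by
    cases hx : PySem.List.max? l1 (fun x => x) with
    | none => exact absurd ((PySem.List.max?_eq_none_iff _ _).mp hx) h1
    | some m => exact ⟨m, rfl⟩
  obtain ⟨m2, hm2⟩ : ∃ m2, PySem.List.max? l2 (fun x => x) = some m2 := by
    cases hx : PySem.List.max? l2 (fun x => x) with
    | none => exact absurd ((PySem.List.max?_eq_none_iff _ _).mp hx) h2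
    | some m => exact ⟨m, rfl⟩
  rw [hm1, hm2]
  have hle1 : m1 ≤ m2 := PySem.List.max?_isMax hm2 m1 ((hiff m1).mp (PySem.List.max?_mem hm1))
  have hle2 : m2 ≤ m1 := PySem.List.max?_isMax hm1 m2 ((hiff m2).mpr (PySem.List.max?_mem hm2))
  simp [le_antisymm hle1 hle2]

-- ---------- the A-side induction ----------

theorem pv_get_some_of_mem_keys (g : List (Int × List Int)) (c : Int) (h : c ∈ pvKeysL g) :
    ∃ adj, (PySem.Dict.mk g).get? c = some adj := by
  cases hx : (PySem.Dict.mk g).get? c with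
  | some adj => exact ⟨adj, rfl⟩
  | none =>
    exfalso
    rw [PySem.Dict.get?_eq_none_iff_not_mem_keys] at hx
    exact hx (by simpa [pvKeysL, PySem.Dict.keys_mk] using h)

def pvCompat (g : List (Int × List Int)) (vs : List (Int × Int)) (c0 : Int)
    (vis : PySem.Dict Int Int) : Prop :=
  ∀ k : Int,
    vis.get? k = (PySem.Dict.mk vs).get? k ∨
    ((PySem.Dict.mk vs).get? k = none ∧ vis.get? k = (pvM g vs c0).get? k ∧
     (pvM g vs c0).get? k ≠ none)

def pvPathOK (g : List (Int × List Int)) (vs : List (Int × Int)) (c0 : Int)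
    (path : Finset Int) (c : Int) : Prop :=
  ∀ p ∈ path, p ∈ pvReach g (PySem.Dict.mk vs) [c0] ∧
    ((PySem.Dict.mk vs).contains c = false → c ∈ pvReach g (PySem.Dict.mk vs) (pvAdj g p))

theorem pvCompat_none (g : List (Int × List Int)) (vs : List (Int × Int)) (c0 : Int)
    (vis : PySem.Dict Int Int) (h : pvCompat g vs c0 vis) (c : Int)
    (hc : vis.get? c = none) : (PySem.Dict.mk vs).get? c = none := by
  rcases h c with h1 | h2
  · rw [← h1]; exact hc
  · exact absurd (hc ▸ h2.2.1).symm h2.2.2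

theorem pv_main (g : List (Int × List Int)) (vs : List (Int × Int)) (c0 : Int)
    (hk : ∀ n ∈ pvTouch g vs c0, n ∈ pvKeysL g)
    (hacyc : ∀ n ∈ pvReach g (PySem.Dict.mk vs) [c0],
      n ∉ pvReach g (PySem.Dict.mk vs) (pvAdj g n))
    (hleaf : ∀ n ∈ pvTouch g vs c0, pvAdj g n = [] →
      (PySem.Dict.mk vs).get? n = none ∨ (PySem.Dict.mk vs).get? n = some 1) :
    ∀ N : Nat,
      (∀ (path : Finset Int) (c : Int) (vis : PySem.Dict Int Int),
        ((pvKeysL g).toFinset \ path).card ≤ N → c ∈ pvTouch g vs c0 →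
        pvPathOK g vs c0 path c → pvCompat g vs c0 vis →
        (dfsA g path c vis).1 = (pvM g vs c0).getD c 0 ∧
        pvCompat g vs c0 (dfsA g path c vis).2 ∧ pvDMono vis (dfsA g path c vis).2) ∧
      (∀ (path : Finset Int) (adj : List Int) (s : PySem.Set Int) (vis : PySem.Dict Int Int),
        ((pvKeysL g).toFinset \ path).card ≤ N →
        (∀ a ∈ adj, a ∈ pvTouch g vs c0 ∧ pvPathOK g vs c0 path a) → pvCompat g vs c0 vis →
        pvCompat g vs c0 (dfsAList g path adj s vis).2 ∧
        pvDMono vis (dfsAList g path adj s vis).2 ∧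
        (∀ x, x ∈ (dfsAList g path adj s vis).1 ↔ x ∈ s ∨
          ∃ a ∈ adj, x = (pvM g vs c0).getD a 0)) := by
  intro N
  induction N using Nat.strong_induction_on with
  | _ N IH =>
  have hSA : ∀ (path : Finset Int) (c : Int) (vis : PySem.Dict Int Int),
      ((pvKeysL g).toFinset \ path).card ≤ N → c ∈ pvTouch g vs c0 →
      pvPathOK g vs c0 path c → pvCompat g vs c0 vis →
      (dfsA g path c vis).1 = (pvM g vs c0).getD c 0 ∧
      pvCompat g vs c0 (dfsA g path c vis).2 ∧ pvDMono vis (dfsA g path c vis).2 := by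
    intro path c vis hcard hc hpath hcompat
    obtain ⟨adj, hadj⟩ := pv_get_some_of_mem_keys g c (hk c hc)
    have hadjeq : pvAdj g c = adj := PySem.Dict.getD_of_get?_eq_some _ _ hadj
    rw [dfsA]
    split
    · next heq => rw [hadj] at heq; simp at heq
    · next adj' heq =>
      rw [hadj] at heq
      obtain rfl : adj = adj' := by simpa using heq
      by_cases hleafc : adj = []
      · rw [if_pos hleafc]
        refine ⟨?_, hcompat, pvDMono_refl vis⟩
        exact (pv_M_leaf g vs c0 hleaf hacyc c hc (by rw [hadjeq]; exact hleafc)).symm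
      · rw [if_neg hleafc]
        cases hvisc : vis.get? c with
        | some v =>
          refine ⟨?_, hcompat, pvDMono_refl vis⟩
          rcases hcompat c with h1 | h2
          · have hv : (PySem.Dict.mk vs).get? c = some v := by rw [← h1, hvisc]
            exact (PySem.Dict.getD_of_get?_eq_some _ 0 (pv_M_sup g vs c0 c v hv)).symm
          · have hv : (pvM g vs c0).get? c = some v := by rw [← h2.2.1, hvisc]
            exact (PySem.Dict.getD_of_get?_eq_some _ 0 hv).symm
        | none =>
          have hvs0 : (PySem.Dict.mk vs).get? c = none :=
            pvCompat_none g vs c0 vis hcompat c hvisc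
          have freshc : (PySem.Dict.mk vs).contains c = false := by
            rw [PySem.Dict.contains_eq_isSome_get?, hvs0]; rfl
          have hcR : c ∈ pvReach g (PySem.Dict.mk vs) [c0] :=
            pv_touch_mem_R g vs c0 c hc freshc
          have hnotpath : c ∉ path := by
            intro hmem
            exact hacyc c hcR ((hpath c hmem).2 freshc)
          rw [dif_neg hnotpath]
          have hlt : ((pvKeysL g).toFinset \ insert c path).card <
              ((pvKeysL g).toFinset \ path).card :=
            pv_card_lt g path c (List.mem_toFinset.mpr (hk c hc)) hnotpath
          have hSL' := (IH (((pvKeysL g).toFinset \ insert c path).card) (by omega)).2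
          have hhyps : ∀ a ∈ adj, a ∈ pvTouch g vs c0 ∧ pvPathOK g vs c0 (insert c path) a := by
            intro a ha
            have haT : a ∈ pvTouch g vs c0 := by
              unfold pvTouch
              exact List.mem_cons_of_mem _
                (List.mem_flatMap.mpr ⟨c, hcR, by rw [hadjeq]; exact ha⟩)
            refine ⟨haT, ?_⟩
            intro p hp
            rcases Finset.mem_insert.mp hp with rfl | hp
            · exact ⟨hcR, fun haf =>
                pv_reach_init_mem g _ (pvAdj g p) a (by rw [hadjeq]; exact ha) haf⟩
            · obtain ⟨hpR, hpc⟩ := hpath p hp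
              exact ⟨hpR, fun haf =>
                pv_reach_closed_adj g _ p c (hpc freshc) a (by rw [hadjeq]; exact ha) haf⟩
          obtain ⟨hcomp2, hmono2, hmem2⟩ :=
            hSL' (insert c path) adj PySem.Set.empty vis le_rfl hhyps hcompat
          obtain ⟨w, hw, hweq⟩ := pv_M_node g vs c0 hacyc c hcR
            (by rw [hadjeq]; simp [List.isEmpty_iff, hleafc])
          have hmaxeq :
              ((PySem.List.max? (dfsAList g (insert c path) adj PySem.Set.empty vis).1
                (fun x => x)).getD 0)
              = ((PySem.List.max? ((pvAdj g c).map (fun m => (pvM g vs c0).getD m 0))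
                (fun x => x)).getD 0) := by
            apply pv_max_eq
            · obtain ⟨a, ha⟩ := List.exists_mem_of_ne_nil adj hleafc
              exact List.ne_nil_of_mem ((hmem2 _).mpr (Or.inr ⟨a, ha, rfl⟩))
            · rw [hadjeq]
              simp [List.map_eq_nil_iff, hleafc]
            · intro x
              rw [hmem2 x]
              simp only [PySem.Set.empty]
              rw [hadjeq]
              constructor
              · rintro (hx | ⟨a, ha, rfl⟩)
                · simp at hx
                · exact List.mem_map.mpr ⟨a, ha, rfl⟩
              · intro hx
                obtain ⟨a, ha, rfl⟩ := List.mem_map.mp hx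
                exact Or.inr ⟨a, ha, rfl⟩
          have hval : 1 + ((PySem.List.max?
              (dfsAList g (insert c path) adj PySem.Set.empty vis).1 (fun x => x)).getD 0) = w := by
            rw [hmaxeq]
            exact hweq.symm
          refine ⟨?_, ?_, ?_⟩
          · simp only [PySem.Dict.getD_insert_self]
            rw [hval]
            exact (PySem.Dict.getD_of_get?_eq_some _ 0 hw).symm
          · intro k
            by_cases hkc : k = c
            · subst hkc
              right
              refine ⟨hvs0, ?_, ?_⟩
              · simp only [PySem.Dict.get?_insert_self]
                rw [hval, hw]
              · rw [hw]; simp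
            · rw [PySem.Dict.get?_insert, if_neg hkc]
              exact hcomp2 k
          · intro k w0 hk0
            have hk2 := hmono2 k w0 hk0
            by_cases hkc : k = c
            · subst hkc
              rw [hvisc] at hk0
              simp at hk0
            · rw [PySem.Dict.get?_insert, if_neg hkc]
              exact hk2
  refine ⟨hSA, ?_⟩
  intro path adj s vis hcard hadjhyp hcompat
  induction adj generalizing s vis with
  | nil =>
    rw [dfsAList]
    refine ⟨hcompat, pvDMono_refl vis, ?_⟩
    intro x
    simp
  | cons a rest ih =>
    rw [dfsAList]
    have ha := hadjhyp a List.mem_cons_self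
    obtain ⟨hval1, hcomp1, hmono1⟩ := hSA path a vis hcard ha.1 ha.2 hcompat
    have hresthyp : ∀ b ∈ rest, b ∈ pvTouch g vs c0 ∧ pvPathOK g vs c0 path b :=
      fun b hb => hadjhyp b (List.mem_cons_of_mem a hb)
    obtain ⟨hcomp2, hmono2, hmem2⟩ := ih _ _ hresthyp hcomp1
    refine ⟨hcomp2, pvDMono_trans hmono1 hmono2, ?_⟩
    intro x
    rw [hmem2 x]
    rw [PySem.Set.mem_add]
    constructor
    · rintro ((hx | rfl) | ⟨b, hb, rfl⟩)
      · exact Or.inl hx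
      · exact Or.inr ⟨a, List.mem_cons_self, hval1.symm ▸ rfl⟩
      · exact Or.inr ⟨b, List.mem_cons_of_mem a hb, rfl⟩
    · rintro (hx | ⟨b, hb, rfl⟩)
      · exact Or.inl (Or.inl hx)
      · rcases List.mem_cons.mp hb with rfl | hb
        · left; right; rw [hval1]
        · exact Or.inr ⟨b, hb, rfl⟩

-- ---------- bridging Pre_'s closure set to the loop-computed reach list ----------

theorem pv_rstep_superset (g : List (Int × List Int)) (vd : PySem.Dict Int Int) (S : Finset Int) :
    S ⊆ pvRStep g vd S := Finset.subset_union_left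

theorem pv_rstep_iterate_superset (g : List (Int × List Int)) (vd : PySem.Dict Int Int) :
    ∀ (k : Nat) (S : Finset Int), S ⊆ (pvRStep g vd)^[k] S := by
  intro k
  induction k with
  | zero => intro S; exact subset_rfl
  | succ k ih =>
    intro S
    rw [Function.iterate_succ_apply]
    exact subset_trans (pv_rstep_superset g vd S) (ih _)

theorem pv_rstep_bound (g : List (Int × List Int)) (vd : PySem.Dict Int Int) (init : List Int)
    (S : Finset Int) (hS : S ⊆ (init ++ g.flatMap (fun p => p.2)).toFinset) :
    pvRStep g vd S ⊆ (init ++ g.flatMap (fun p => p.2)).toFinset := by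
  intro x hx
  rcases Finset.mem_union.mp hx with h | h
  · exact hS h
  · obtain ⟨n, _, hxn⟩ := Finset.mem_biUnion.mp h
    rw [List.mem_toFinset] at hxn
    rw [List.mem_toFinset, List.mem_append]
    exact Or.inr (pv_mem_adj_flat g n x hxn)

theorem pv_rset_fix_aux (g : List (Int × List Int)) (vd : PySem.Dict Int Int) (init : List Int) :
    ∀ (m : Nat) (S : Finset Int), S ⊆ (init ++ g.flatMap (fun p => p.2)).toFinset →
      (init ++ g.flatMap (fun p => p.2)).toFinset.card + 1 ≤ m + S.card →
      pvRStep g vd ((pvRStep g vd)^[m] S) = (pvRStep g vd)^[m] S := by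
  intro m
  induction m with
  | zero =>
    intro S hS hcard
    have := Finset.card_le_card hS
    omega
  | succ m ih =>
    intro S hS hcard
    by_cases hfix : pvRStep g vd S = S
    · rw [Function.iterate_fixed hfix, hfix]
    · have hlt : S.card < (pvRStep g vd S).card :=
        Finset.card_lt_card (Finset.ssubset_iff_subset_ne.mpr
          ⟨pv_rstep_superset g vd S, Ne.symm hfix⟩)
      rw [Function.iterate_succ_apply]
      exact ih (pvRStep g vd S) (pv_rstep_bound g vd init S hS) (by omega)

theorem pv_rset_fix (g : List (Int × List Int)) (vd : PySem.Dict Int Int) (init : List Int) :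
    pvRStep g vd (pvRSet g vd init) = pvRSet g vd init := by
  apply pv_rset_fix_aux g vd init _ init.toFinset (by
    intro x hx
    rw [List.mem_toFinset] at hx ⊢
    exact List.mem_append_left _ hx)
  have h1 : (init ++ g.flatMap (fun p => p.2)).toFinset.card
      ≤ (init ++ g.flatMap (fun p => p.2)).length := List.toFinset_card_le _
  omega

theorem pv_rset_init (g : List (Int × List Int)) (vd : PySem.Dict Int Int) (init : List Int)
    (x : Int) (hx : x ∈ init) : x ∈ pvRSet g vd init :=
  pv_rstep_iterate_superset g vd _ init.toFinset (List.mem_toFinset.mpr hx)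

theorem pv_rset_closed (g : List (Int × List Int)) (vd : PySem.Dict Int Int) (init : List Int)
    (n : Int) (hn : n ∈ pvRSet g vd init) (hf : vd.contains n = false) (m : Int)
    (hm : m ∈ pvAdj g n) : m ∈ pvRSet g vd init := by
  rw [← pv_rset_fix g vd init]
  apply Finset.mem_union_right
  exact Finset.mem_biUnion.mpr ⟨n, Finset.mem_filter.mpr ⟨hn, by simp [hf]⟩,
    List.mem_toFinset.mpr hm⟩

theorem pv_reach_sub_rset (g : List (Int × List Int)) (vd : PySem.Dict Int Int) (init : List Int) :
    ∀ x ∈ pvReach g vd init, x ∈ pvRSet g vd init := by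
  intro x hx
  refine (pv_reach_min g vd init (fun y => y ∈ pvRSet g vd init ∧ vd.contains y = false)
    ?_ ?_ x hx).1
  · rintro n ⟨hn, hnf⟩ m hm hmf
    exact ⟨pv_rset_closed g vd init n hn hnf m hm, hmf⟩
  · intro y hy hyf
    exact ⟨pv_rset_init g vd init y hy, hyf⟩

theorem pv_touch_sub_rset (g : List (Int × List Int)) (vs : List (Int × Int)) (c0 : Int) :
    ∀ n ∈ pvTouch g vs c0, n ∈ pvRSet g (PySem.Dict.mk vs) [c0] := by
  intro n hn
  unfold pvTouch at hn
  rcases List.mem_cons.mp hn with rfl | hn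
  · exact pv_rset_init g _ [n] n (by simp)
  · obtain ⟨p, hp, hadj⟩ := List.mem_flatMap.mp hn
    exact pv_rset_closed g _ [c0] p (pv_reach_sub_rset g _ [c0] p hp)
      (pv_reach_fresh g _ [c0] p hp) n hadj

-- ===== VERDICT (by name: the statement is the Claim_ definition above) =====
theorem explore_dfs_py_spec : Claim_equal_explore_dfs_py := by
  intro graph course visited _ hpre
  obtain ⟨ha, hb, hc⟩ := hpre
  have hk : ∀ n ∈ pvTouch graph visited course, n ∈ pvKeysL graph :=
    fun n hn => ha n (pv_touch_sub_rset graph visited course n hn)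
  have hleaf : ∀ n ∈ pvTouch graph visited course, pvAdj graph n = [] →
      (PySem.Dict.mk visited).get? n = none ∨ (PySem.Dict.mk visited).get? n = some 1 :=
    fun n hn => hc n (pv_touch_sub_rset graph visited course n hn)
  have hacyc : ∀ n ∈ pvReach graph (PySem.Dict.mk visited) [course],
      n ∉ pvReach graph (PySem.Dict.mk visited) (pvAdj graph n) := by
    intro n hn hmem
    exact hb n (pv_reach_sub_rset graph _ [course] n hn)
      (pv_reach_fresh graph _ [course] n hn)
      (pv_reach_sub_rset graph _ (pvAdj graph n) n hmem)
  unfold Spec_explore_dfs_py explore_dfs_py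
  have hmain := (pv_main graph visited course hk hacyc hleaf
    (((pvKeysL graph).toFinset \ (∅ : Finset Int)).card)).1
  have h := hmain ∅ course (PySem.Dict.mk visited) le_rfl
    (by unfold pvTouch; exact List.mem_cons_self)
    (by intro p hp; simp at hp)
    (fun k => Or.inl rfl)
  rw [pv_alt_eq, h.1]
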